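-- pv_equiv track=rewrite | github.com/tkong9/ACSL-Sr | Assignments/lex_strings_answer.py | rearrangedString
-- ===== SOURCE A (Python) =====
-- def rearrangedString(s):
--     s = ''.join(ch for ch in s if ch.isalnum())
--     newS = s.replace(" ", "")
--     letters = []
--     current = 1
--     for i in newS:
--         for j in range(newS.index(i) + 1, len(newS)):
--             if (i == newS[j:j + 1]):
--                 current = current + 1
--         letters.append(i)
--         letters.append(current)
--         current = 1
--
--     m = 0
--     output = ""
--     num = len(letters) / 2
--     num = int(num)
--     for x in range(0, num):
--         smallList = []
--         m = maxOfList(letters)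
--         if (m == 0):
--             break
--         c = letters.count(m)
--         if (x % 2 == 0):
--             for times in range(0, c):
--                 indexOf = letters.index(m)
--                 le = letters[indexOf - 1:indexOf]
--                 if (smallList.count(le) == 0):
--                     if (len(smallList) == 0):
--                         smallList.append(le)
--                     else:
--                         for l in smallList:
--                             if (le < l):
--                                 smallList.insert(smallList.index(l), le)
--                                 break
--                             if (smallList.index(l) == len(smallList) - 1):
--                                 smallList.append(le)
--                                 break
--                 letters.pop(indexOf)
--                 letters.pop(indexOf - 1)
--         else:
--             for times in range(0, c):
--                 indexOf = letters.index(m)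
--                 le = letters[indexOf - 1:indexOf]
--                 if (smallList.count(le) == 0):
--                     if (len(smallList) == 0):
--                         smallList.append(le)
--                     else:
--                         for l in smallList:
--                             if (le > l):
--                                 smallList.insert(smallList.index(l), le)
--                                 break
--                             if (smallList.index(l) == len(smallList) - 1):
--                                 smallList.append(le)
--                                 break
--                 letters.pop(indexOf)
--                 letters.pop(indexOf - 1)
--         st = ""
--         for s in smallList:
--             for r in s:
--                 st = st + r
--         if (m == 1):
--             output = output + str(m) + st
--         else:
--             output = output + str(m) + st + ","
--         st = ""
--     return output
--
-- def maxOfList(list):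
--     max = 0
--     for p in list:
--         if (type(p) == int):
--             if (p > max):
--                 max = p
--     return max
-- ===== SOURCE B (Python) =====
-- def rearrangedString(s):
--     t = [ch for ch in s if ch.isalnum()]
--     cnt = {}
--     for ch in t:
--         cnt[ch] = cnt.get(ch, 0) + 1
--     parts = []
--     for x, m in enumerate(sorted(set(cnt.values()), reverse=True)):
--         chars = sorted((ch for ch in cnt if cnt[ch] == m), reverse=(x % 2 == 1))
--         parts.append(str(m) + ''.join(chars) + ("" if m == 1 else ","))
--     return ''.join(parts)
-- ===== Notes on version B (the rewrite author's own statement) =====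
-- stated objective: faster
-- what changed: Replace A's quadratic per-character rescans and repeated max/index/pop passes over a mixed char/count list by one dict counting pass plus sorting the distinct counts and each frequency group (asc/desc by group rank).
import Mathlib
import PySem

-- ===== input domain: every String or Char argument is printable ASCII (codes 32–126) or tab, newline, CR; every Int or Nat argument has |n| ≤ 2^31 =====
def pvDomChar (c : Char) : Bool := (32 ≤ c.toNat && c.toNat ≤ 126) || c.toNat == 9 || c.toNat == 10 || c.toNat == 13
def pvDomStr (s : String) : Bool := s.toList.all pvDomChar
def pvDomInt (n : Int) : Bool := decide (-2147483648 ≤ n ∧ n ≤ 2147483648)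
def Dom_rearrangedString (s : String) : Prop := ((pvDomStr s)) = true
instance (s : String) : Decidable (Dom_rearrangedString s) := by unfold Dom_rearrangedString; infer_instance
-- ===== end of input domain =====

-- B replaces A's quadratic rescans and repeated max/index/pop passes over a mixed char/count
-- list by one counting pass plus sorting (distinct counts descending; each group asc/desc).

-- ===== PORT A =====

-- the values stored in A's heterogeneous 'letters' list: characters and integer counts
inductive LV
  | ch : Char → LV
  | num : Int → LV
deriving DecidableEq, Repr

-- helper maxOfList: 'max' over the int entries only
def maxOfList (l : List LV) : Int :=
  l.foldl (fun mx p => match p with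
    | LV.num n => if n > mx then n else mx
    | LV.ch _ => mx) 0

-- Python's 'le < l' on the one-element list slices held in smallList; comparing a str with an
-- int raises TypeError in Python — that branch is unreachable (smallList holds char slices only)
def lvLt : LV → LV → Bool
  | LV.ch a, LV.ch b => a < b
  | _, _ => false

def pyListLt : List LV → List LV → Bool
  | [], [] => false
  | [], _ :: _ => true
  | _ :: _, [] => false
  | a :: as, b :: bs => if lvLt a b then true else if lvLt b a then false else pyListLt as bs

-- 'for l in smallList: …' — both branches differ only in the comparison, carried as 'asc'
def insertLoop (asc : Bool) (le : List LV) (sl : List (List LV)) : List (List LV) → List (List LV)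
  | [] => sl
  | l :: rest =>
    if (if asc then pyListLt le l else pyListLt l le) then
      PySem.List.insert sl (((PySem.List.index? sl l).getD 0 : Nat) : Int) le
    else if (PySem.List.index? sl l).getD 0 == sl.length - 1 then sl ++ [le]
    else insertLoop asc le sl rest

-- 'for times in range(0, c): …' (asc = (x % 2 == 0)); letters.index / letters.pop always
-- succeed in A (LV.num m is present), so the none branches are unreachable
def timesLoop (asc : Bool) (m : Int) : Nat → List (List LV) → List LV → (List (List LV)) × List LV
  | 0, sl, letters => (sl, letters)
  | Nat.succ t, sl, letters =>
    let indexOf : Nat := (PySem.List.index? letters (LV.num m)).getD 0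
    let le := PySem.List.slice letters (some ((indexOf : Int) - 1)) (some (indexOf : Int))
    let sl' := if PySem.List.count sl le == 0 then
        (if sl.length == 0 then sl ++ [le] else insertLoop asc le sl sl)
      else sl
    let letters₁ := match PySem.List.pop? letters (indexOf : Int) with
      | some (_, r) => r | none => letters
    let letters₂ := match PySem.List.pop? letters₁ ((indexOf : Int) - 1) with
      | some (_, r) => r | none => letters₁
    timesLoop asc m t sl' letters₂

-- 'st = ""; for s in smallList: for r in s: st = st + r' ('str + int' would raise; unreachable)
def stOf (sl : List (List LV)) : List Char :=
  sl.foldl (fun st s => s.foldl (fun st r => match r with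
    | LV.ch c => st ++ [c]
    | LV.num _ => st) st) []

-- 'for x in range(0, num): …' with the early 'break' on m == 0
def outerLoop : Nat → Nat → List LV → List Char → List Char
  | 0, _, _, output => output
  | Nat.succ k, x, letters, output =>
    let m := maxOfList letters
    if m == 0 then output
    else
      let c := PySem.List.count letters (LV.num m)
      let p := timesLoop (x % 2 == 0) m c [] letters
      let st := stOf p.1
      let output' := if m == 1 then output ++ (PySem.Int.toChars m) ++ st
        else output ++ (PySem.Int.toChars m) ++ st ++ [',']
      outerLoop k (x + 1) p.2 output'

-- the first loop: 'for i in newS: for j in range(newS.index(i)+1, len(newS)): …'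
def phase1 (newS : List Char) : List LV :=
  (newS.foldl (fun (p : List LV × Int) i =>
    let current := (PySem.List.pyRange (((PySem.List.index? newS i).getD 0 : Int) + 1) (newS.length : Int) 1).foldl
      (fun cur j => if [i] = PySem.List.slice newS (some j) (some (j + 1)) then cur + 1 else cur) p.2
    (p.1 ++ [LV.ch i, LV.num current], 1)) ([], 1)).1

def rearrangedString (s : String) : String :=
  let s1 := s.toList.filter (fun ch => PySem.Chars.isalnum ch)
  let newS := PySem.Chars.replace s1 [' '] []
  let letters := phase1 newS
  -- 'num = int(len(letters) / 2)': the length is even, so float division then int() is exact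
  let num := letters.length / 2
  String.ofList (outerLoop num 0 letters [])

-- ===== PORT B =====

-- 'for x, m in enumerate(sorted(set(cnt.values()), reverse=True)): …'
def altGroups (cnt : PySem.Dict Char Int) (x : Nat) : List Int → List Char
  | [] => []
  | m :: rest =>
    let chars := PySem.List.sorted ((cnt.keys).filter (fun ch => cnt.getD ch 0 == m)) (fun c => c) (x % 2 == 1)
    PySem.Int.toChars m ++ chars ++ (if m == 1 then [] else [',']) ++ altGroups cnt (x + 1) rest

def rearrangedString_alt (s : String) : String :=
  let t := s.toList.filter (fun ch => PySem.Chars.isalnum ch)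
  let cnt := t.foldl (fun (d : PySem.Dict Char Int) ch => d.modify ch 0 (· + 1)) PySem.Dict.empty
  let ms := PySem.List.sorted (PySem.Set.ofList cnt.values) (fun v => v) true
  String.ofList (altGroups cnt 0 ms)

-- ===== PRECONDITION & SPEC =====
def Spec_rearrangedString (s : String) (out : String) : Prop := out = rearrangedString_alt s
instance (s : String) (out : String) : Decidable (Spec_rearrangedString s out) := by unfold Spec_rearrangedString; infer_instance

-- ===== CLAIM (what is proved, stated in full; the proofs are below) =====
def Claim_equal_rearrangedString : Prop := ∀ (s : String), Dom_rearrangedString s → Spec_rearrangedString s (rearrangedString s)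


-- ===== LEMMAS AND PROOFS =====

-- count as an Int, relative to the fixed filtered string t
def cntI (t : List Char) (c : Char) : Int := (t.count c : Int)

-- the shape of A's 'letters' list: each remaining character paired with its count in t
def pairs (t u : List Char) : List LV := u.flatMap (fun c => [LV.ch c, LV.num (cntI t c)])

-- ordered insert used to describe insertLoop's effect
def oins (asc : Bool) (c : Char) : List Char → List Char
  | [] => [c]
  | d :: ds => if (if asc then c < d else d < c) then c :: d :: ds else d :: oins asc c ds

-- one 'times' iteration's effect on smallList, at the level of the inserted character
def stepF (asc : Bool) (sl : List (List LV)) (c : Char) : List (List LV) :=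
  if PySem.List.count sl [LV.ch c] == 0 then
    (if sl.length == 0 then sl ++ [[LV.ch c]] else insertLoop asc [LV.ch c] sl sl)
  else sl

theorem replace_go_no_space (fuel : Nat) : ∀ (l acc : List Char), ' ' ∉ l →
    PySem.Chars.replace.go [' '] [] fuel l acc = acc.reverse ++ l := by
  induction fuel with
  | zero => intro l acc h; simp [PySem.Chars.replace.go]
  | succ n ih =>
    intro l acc h
    match l with
    | [] => simp [PySem.Chars.replace.go]
    | c :: t =>
      have hc : ¬ (' ' = c) := fun e => h (e ▸ List.mem_cons_self)
      have hp : [' '].isPrefixOf (c :: t) = false := by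
        simp [List.isPrefixOf]; exact fun e => hc e
      rw [PySem.Chars.replace.go, hp]
      simp only [Bool.false_eq_true, if_false]
      rw [ih t (c :: acc) (fun m => h (List.mem_cons_of_mem _ m))]
      simp

theorem replace_no_space (t : List Char) (h : ' ' ∉ t) :
    PySem.Chars.replace t [' '] [] = t := by
  rw [PySem.Chars.replace]
  simp only [List.isEmpty_cons, if_false, Bool.false_eq_true]
  simpa using replace_go_no_space t.length t [] h

theorem countRange (t : List Char) (i : Char) : ∀ (d k : Nat) (init : Int), t.length - k = d →
    (PySem.List.pyRange (k : Int) (t.length : Int) 1).foldl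
      (fun cur j => if [i] = PySem.List.slice t (some j) (some (j + 1)) then cur + 1 else cur) init
    = init + ((t.drop k).count i : Int) := by
  intro d
  induction d with
  | zero =>
    intro k init hd
    have hk : t.length ≤ k := by omega
    have hr : PySem.List.pyRange (k : Int) (t.length : Int) 1 = [] := by
      simp [PySem.List.pyRange]
      intro h; exfalso; omega
    rw [hr]
    simp [List.drop_eq_nil_of_le hk]
  | succ d ih =>
    intro k init hd
    have hk : k < t.length := by omega
    have hr : PySem.List.pyRange (k : Int) (t.length : Int) 1
        = (k : Int) :: PySem.List.pyRange ((k : Int) + 1) (t.length : Int) 1 := by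
      exact PySem.List.pyRange_one_cons (by exact_mod_cast hk)
    have hcast : ((k : Int) + 1) = ((k + 1 : Nat) : Int) := by push_cast; ring
    have hsl : PySem.List.slice t (some (k : Int)) (some ((k : Int) + 1)) = [t[k]] := by
      rw [hcast]
      have h2 : ((k + 1 : Nat) : Int) = ((k : Nat) : Int) + ((1 : Nat) : Int) := by push_cast; ring
      rw [h2, PySem.List.slice_natCast_add]
      rw [List.drop_eq_getElem_cons hk]
      simp only [List.take_succ_cons, List.take_zero]
    rw [hr, List.foldl_cons, hsl, hcast, ih (k + 1) _ (by omega)]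
    rw [List.drop_eq_getElem_cons hk]
    rw [List.count_cons]
    by_cases hi : t[k] = i
    · simp [hi]; ring
    · have hne : ¬ ([i] = [t[k]]) := by simp; exact fun e => hi e.symm
      simp [hne, beq_iff_eq, hi]

theorem phase1_go (t : List Char) : ∀ (u : List Char) (acc : List LV), (∀ i ∈ u, i ∈ t) →
    (u.foldl (fun (p : List LV × Int) i =>
      let current := (PySem.List.pyRange (((PySem.List.index? t i).getD 0 : Int) + 1) (t.length : Int) 1).foldl
        (fun cur j => if [i] = PySem.List.slice t (some j) (some (j + 1)) then cur + 1 else cur) p.2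
      (p.1 ++ [LV.ch i, LV.num current], 1)) (acc, 1)).1 = acc ++ pairs t u := by
  intro u
  induction u with
  | nil => intro acc _; simp [pairs]
  | cons i u' ih =>
    intro acc hmem
    have hit : i ∈ t := hmem i List.mem_cons_self
    obtain ⟨idx, hidx⟩ : ∃ idx, PySem.List.index? t i = some idx :=
      Option.isSome_iff_exists.mp ((PySem.List.index?_isSome_iff t i).2 hit)
    obtain ⟨pre, suf, hsplit, hlen, hnotin⟩ := (PySem.List.index?_eq_some_iff _ _ _).1 hidx
    have hteq : t = (pre ++ [i]) ++ suf := by simp [hsplit]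
    have hdrop : t.drop (idx + 1) = suf := by
      conv_lhs => rw [hteq]
      rw [show idx + 1 = (pre ++ [i]).length by simp [hlen]]
      exact List.drop_left
    have hcnt : t.count i = suf.count i + 1 := by
      rw [hsplit]
      rw [List.count_append, List.count_cons_self]
      rw [List.count_eq_zero.2 hnotin]
      omega
    have hcur : (PySem.List.pyRange (((PySem.List.index? t i).getD 0 : Int) + 1) (t.length : Int) 1).foldl
        (fun cur j => if [i] = PySem.List.slice t (some j) (some (j + 1)) then cur + 1 else cur) (1 : Int)
        = cntI t i := by
      rw [hidx]
      simp only [Option.getD_some]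
      rw [show ((idx : Int) + 1) = ((idx + 1 : Nat) : Int) by push_cast; ring]
      rw [countRange t i (t.length - (idx + 1)) (idx + 1) 1 rfl, hdrop]
      rw [cntI, hcnt]
      push_cast; ring
    rw [List.foldl_cons]
    simp only [hcur]
    rw [ih (acc ++ [LV.ch i, LV.num (cntI t i)]) (fun j h => hmem j (List.mem_cons_of_mem _ h))]
    simp [pairs]

theorem phase1_eq (t : List Char) : phase1 t = pairs t t := by
  rw [phase1]
  exact phase1_go t t [] (fun i h => h)

theorem pairs_append (t u v : List Char) : pairs t (u ++ v) = pairs t u ++ pairs t v := by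
  simp [pairs]

theorem length_pairs (t : List Char) : ∀ u : List Char, (pairs t u).length = 2 * u.length := by
  intro u; induction u with
  | nil => simp [pairs]
  | cons c u ih => simp [pairs] at ih ⊢; omega

theorem maxOfList_pairs_foldl (t : List Char) : ∀ (u : List Char) (a : Int),
    (pairs t u).foldl (fun mx p => match p with
      | LV.num n => if n > mx then n else mx
      | LV.ch _ => mx) a = u.foldl (fun mx c => max mx (cntI t c)) a := by
  intro u
  induction u with
  | nil => intro a; simp [pairs]
  | cons c u ih =>
    intro a
    show List.foldl _ _ (LV.ch c :: LV.num (cntI t c) :: pairs t u) = _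
    rw [List.foldl_cons, List.foldl_cons, List.foldl_cons, ih]
    congr 1
    simp only []
    rcases le_or_gt (cntI t c) a with h | h
    · rw [if_neg (by omega), max_eq_left h]
    · rw [if_pos (by omega), max_eq_right (le_of_lt h)]

theorem foldl_max_eq : ∀ (l : List Int) (a m : Int), (∀ v ∈ l, v ≤ m) → (m ∈ l ∨ a = m) → a ≤ m →
    l.foldl max a = m := by
  intro l
  induction l with
  | nil => intro a m _ hm _; simp at hm ⊢; omega
  | cons x xs ih =>
    intro a m hub hm ha
    rw [List.foldl_cons]
    have hx : x ≤ m := hub x List.mem_cons_self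
    rcases hm with hm | hm
    · rcases List.mem_cons.1 hm with he | hxs
      · exact ih (max a x) m (fun v hv => hub v (List.mem_cons_of_mem _ hv))
          (Or.inr (by omega)) (by omega)
      · exact ih (max a x) m (fun v hv => hub v (List.mem_cons_of_mem _ hv)) (Or.inl hxs) (by omega)
    · exact ih (max a x) m (fun v hv => hub v (List.mem_cons_of_mem _ hv)) (Or.inr (by omega)) (by omega)

theorem maxOfList_eq (t u : List Char) (m : Int) (hub : ∀ c ∈ u, cntI t c ≤ m)
    (hmem : ∃ c ∈ u, cntI t c = m) (hpos : 0 ≤ m) : maxOfList (pairs t u) = m := by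
  rw [maxOfList, maxOfList_pairs_foldl]
  have : u.foldl (fun mx c => max mx (cntI t c)) 0 = (u.map (cntI t)).foldl max 0 := by
    rw [List.foldl_map]
  rw [this]
  apply foldl_max_eq
  · intro v hv; obtain ⟨c, hc, rfl⟩ := List.mem_map.1 hv; exact hub c hc
  · left; obtain ⟨c, hc, he⟩ := hmem; exact List.mem_map.2 ⟨c, hc, he⟩
  · exact hpos

theorem count_pairs (t : List Char) (m : Int) : ∀ u : List Char,
    PySem.List.count (pairs t u) (LV.num m) = u.countP (fun c => cntI t c == m) := by
  intro u
  induction u with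
  | nil => simp [pairs, PySem.List.count]
  | cons c u ih =>
    show PySem.List.count (LV.ch c :: LV.num (cntI t c) :: pairs t u) _ = _
    rw [PySem.List.count_eq] at ih ⊢
    rw [List.count_cons, List.count_cons, ih, List.countP_cons]
    have : (LV.ch c == LV.num m) = false := by rfl
    simp [this, LV.num.injEq]

theorem index?_pairs (t : List Char) (m : Int) : ∀ (p : List Char) (c : Char) (r : List Char),
    (∀ d ∈ p, cntI t d ≠ m) → cntI t c = m →
    PySem.List.index? (pairs t (p ++ c :: r)) (LV.num m) = some (2 * p.length + 1) := by
  intro p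
  induction p with
  | nil =>
    intro c r _ hc
    show PySem.List.index? (LV.ch c :: LV.num (cntI t c) :: pairs t r) _ = _
    rw [PySem.List.index?_cons_of_ne _ (by intro h; cases h)]
    rw [hc, PySem.List.index?_cons_self]
    rfl
  | cons d p ih =>
    intro c r hp hc
    show PySem.List.index? (LV.ch d :: LV.num (cntI t d) :: pairs t (p ++ c :: r)) _ = _
    rw [PySem.List.index?_cons_of_ne _ (by intro h; cases h)]
    rw [PySem.List.index?_cons_of_ne _ (by
      intro h
      exact hp d List.mem_cons_self (LV.num.injEq _ _ ▸ congrArg (fun x => x) h ▸ (by cases h; rfl)))]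
    rw [ih c r (fun e he => hp e (List.mem_cons_of_mem _ he)) hc]
    simp; omega

theorem times_step (asc : Bool) (t : List Char) (m : Int) (p : List Char) (c : Char) (r : List Char)
    (sl : List (List LV)) (n : Nat) (hp : ∀ d ∈ p, cntI t d ≠ m) (hc : cntI t c = m) :
    timesLoop asc m (n + 1) sl (pairs t (p ++ c :: r)) =
    timesLoop asc m n (stepF asc sl c) (pairs t (p ++ r)) := by
  have hsplit : pairs t (p ++ c :: r) = pairs t p ++ LV.ch c :: LV.num m :: pairs t r := by
    rw [pairs_append]; simp [pairs, hc]
  have hidx := index?_pairs t m p c r hp hc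
  have hlenp := length_pairs t p
  have hlen : (pairs t (p ++ c :: r)).length = 2 * p.length + 2 * r.length + 2 := by
    rw [length_pairs]; simp; omega
  have hInt1 : ((2 * p.length + 1 : Nat) : Int) - 1 = ((2 * p.length : Nat) : Int) := by
    push_cast; ring
  have hle : PySem.List.slice (pairs t (p ++ c :: r)) (some (((2 * p.length + 1 : Nat) : Int) - 1))
      (some ((2 * p.length + 1 : Nat) : Int)) = [LV.ch c] := by
    rw [hInt1, show ((2 * p.length + 1 : Nat) : Int) = ((2 * p.length : Nat) : Int) + ((1 : Nat) : Int) by push_cast; ring]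
    rw [PySem.List.slice_natCast_add]
    rw [hsplit, ← hlenp, List.drop_left]
    simp
  have hb1 : 2 * p.length + 1 < (pairs t (p ++ c :: r)).length := by omega
  have hera1 : (pairs t (p ++ c :: r)).eraseIdx (2 * p.length + 1)
      = (pairs t p ++ [LV.ch c]) ++ pairs t r := by
    rw [hsplit]
    rw [show pairs t p ++ LV.ch c :: LV.num m :: pairs t r
        = (pairs t p ++ [LV.ch c]) ++ LV.num m :: pairs t r by simp]
    rw [List.eraseIdx_append_of_length_le (by simp [hlenp])]
    simp [hlenp]
  have hpop1 : PySem.List.pop? (pairs t (p ++ c :: r)) ((2 * p.length + 1 : Nat) : Int)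
      = some ((pairs t (p ++ c :: r))[2 * p.length + 1], (pairs t (p ++ c :: r)).eraseIdx (2 * p.length + 1)) :=
    PySem.List.pop?_natCast _ _ hb1
  have hb2 : 2 * p.length < ((pairs t p ++ [LV.ch c]) ++ pairs t r).length := by simp [hlenp]
  have hera2 : ((pairs t p ++ [LV.ch c]) ++ pairs t r).eraseIdx (2 * p.length) = pairs t (p ++ r) := by
    rw [show (pairs t p ++ [LV.ch c]) ++ pairs t r = pairs t p ++ (LV.ch c :: pairs t r) by simp]
    rw [List.eraseIdx_append_of_length_le (by omega)]
    rw [pairs_append]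
    simp [hlenp]
  have hpop2 : PySem.List.pop? ((pairs t p ++ [LV.ch c]) ++ pairs t r) (((2 * p.length + 1 : Nat) : Int) - 1)
      = some ((((pairs t p ++ [LV.ch c]) ++ pairs t r))[2 * p.length], pairs t (p ++ r)) := by
    rw [hInt1, ← hera2]
    exact PySem.List.pop?_natCast _ _ hb2
  rw [timesLoop]
  simp only [hidx, Option.getD_some, hle, hpop1, hera1, hpop2]
  rfl

theorem exists_first_split {α : Type} (P : α → Bool) : ∀ (u : List α), u.countP P ≠ 0 →
    ∃ p c r, u = p ++ c :: r ∧ (∀ d ∈ p, ¬ P d = true) ∧ P c = true := by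
  intro u
  induction u with
  | nil => intro h; simp at h
  | cons x xs ih =>
    intro h
    by_cases hx : P x = true
    · exact ⟨[], x, xs, by simp, by simp, hx⟩
    · have : xs.countP P ≠ 0 := by rw [List.countP_cons] at h; simpa [hx] using h
      obtain ⟨p, c, r, he, hp, hc⟩ := ih this
      exact ⟨x :: p, c, r, by simp [he], by
        intro d hd
        rcases List.mem_cons.1 hd with rfl | hd
        · exact hx
        · exact hp d hd, hc⟩

theorem timesLoop_spec (asc : Bool) (t : List Char) (m : Int) : ∀ (fuel : Nat) (u : List Char) (sl : List (List LV)),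
    fuel = u.countP (fun c => cntI t c == m) →
    timesLoop asc m fuel sl (pairs t u) =
      ((u.filter (fun c => cntI t c == m)).foldl (stepF asc) sl,
       pairs t (u.filter (fun c => ¬ cntI t c == m))) := by
  intro fuel
  induction fuel with
  | zero =>
    intro u sl h
    have hall : ∀ c ∈ u, ¬ (cntI t c == m) = true := by
      intro c hc
      exact (List.countP_eq_zero.1 h.symm) c hc
    rw [List.filter_eq_nil_iff.2 hall]
    rw [List.filter_eq_self.2 (by intro c hc; simpa using hall c hc)]
    rfl
  | succ n ih =>
    intro u sl h
    obtain ⟨p, c, r, rfl, hp, hc⟩ := exists_first_split (fun c => cntI t c == m) u (by omega)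
    have hp' : ∀ d ∈ p, cntI t d ≠ m := by
      intro d hd he; exact hp d hd (by simpa using he)
    have hc' : cntI t c = m := by simpa using hc
    rw [times_step asc t m p c r sl n hp' hc']
    have hcount : n = (p ++ r).countP (fun c => cntI t c == m) := by
      rw [List.countP_append] at h ⊢
      rw [List.countP_cons] at h
      have h0 : p.countP (fun c => cntI t c == m) = 0 := List.countP_eq_zero.2 hp
      simp [h0, hc] at h ⊢
      omega
    rw [ih (p ++ r) (stepF asc sl c) hcount]
    have hfp : p.filter (fun c => cntI t c == m) = [] := List.filter_eq_nil_iff.2 hp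
    have hfp' : p.filter (fun c => ¬ cntI t c == m) = p :=
      List.filter_eq_self.2 (by intro d hd; simpa using hp d hd)
    simp [List.filter_append, hfp, hc']

-- [LV.ch c] viewed as a one-character slice
def fCh (c : Char) : List LV := [LV.ch c]

-- the smallList order: ascending for even x, descending for odd x
def relA (asc : Bool) (a b : Char) : Bool := if asc then decide (a < b) else decide (b < a)

theorem fCh_injective : Function.Injective fCh := by
  intro a b h
  simpa [fCh] using h

theorem insert_natCast {α : Type} (xs : List α) (k : Nat) (v : α) (h : k ≤ xs.length) :
    PySem.List.insert xs (k : Int) v = xs.take k ++ v :: xs.drop k := by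
  rw [PySem.List.insert, PySem.List.sliceIndices]
  have h1 : ¬ ((1 : Int) < 0) := by omega
  have h2 : ¬ ((k : Int) < 0) := by omega
  simp only [h1, if_false, h2]
  have h3 : min (k : Int) (xs.length : Int) = (k : Int) := by omega
  rw [h3]
  simp

theorem pyListLt_fCh (a b : Char) : pyListLt (fCh a) (fCh b) = decide (a < b) := by
  by_cases h : a < b
  · simp [pyListLt, lvLt, fCh, h]
  · by_cases h2 : b < a
    · simp [pyListLt, lvLt, fCh, h, h2]
    · simp [pyListLt, lvLt, fCh, h, h2]

theorem index?_map_fCh : ∀ (pre : List Char) (d : Char) (rest : List Char), d ∉ pre →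
    PySem.List.index? ((pre ++ d :: rest).map fCh) (fCh d) = some pre.length := by
  intro pre
  induction pre with
  | nil => intro d rest _; simp only [List.nil_append, List.map_cons]; rw [PySem.List.index?_cons_self]; rfl
  | cons e pre ih =>
    intro d rest hd
    have hne : e ≠ d := fun h => hd (h ▸ List.mem_cons_self)
    simp only [List.cons_append, List.map_cons]
    rw [PySem.List.index?_cons_of_ne _ (fun h => hne (fCh_injective h))]
    rw [ih d rest (fun h => hd (List.mem_cons_of_mem _ h))]
    simp

theorem oins_pos {asc : Bool} {c d : Char} (ds : List Char) (h : relA asc c d = true) :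
    oins asc c (d :: ds) = c :: d :: ds := by
  cases asc <;> simp [relA] at h <;> simp [oins, h]

theorem oins_neg {asc : Bool} {c d : Char} (ds : List Char) (h : relA asc c d = false) :
    oins asc c (d :: ds) = d :: oins asc c ds := by
  cases asc <;> simp [relA] at h <;> simp [oins, not_lt_of_ge h]

theorem relA_total (asc : Bool) {c d : Char} (h : relA asc c d = false) (hne : c ≠ d) :
    relA asc d c = true := by
  cases asc <;> simp [relA] at h ⊢
  · exact lt_of_le_of_ne h hne
  · exact lt_of_le_of_ne h (Ne.symm hne)

theorem insertLoop_go (asc : Bool) (c : Char) : ∀ (rest pre : List Char),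
    (pre ++ rest).Nodup → c ∉ pre ++ rest → rest ≠ [] →
    insertLoop asc (fCh c) ((pre ++ rest).map fCh) (rest.map fCh)
      = (pre ++ oins asc c rest).map fCh := by
  intro rest
  induction rest with
  | nil => intro pre _ _ h; exact absurd rfl h
  | cons d rest' ih =>
    intro pre hnd hc _
    have hdpre : d ∉ pre := fun h =>
      (List.disjoint_of_nodup_append hnd) h List.mem_cons_self
    have hcd : c ≠ d := by
      intro h; exact hc (h ▸ List.mem_append_right _ List.mem_cons_self)
    have hmap : (pre ++ d :: rest').map fCh = pre.map fCh ++ fCh d :: rest'.map fCh := by simp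
    have hidx : PySem.List.index? ((pre ++ d :: rest').map fCh) (fCh d) = some pre.length :=
      index?_map_fCh pre d rest' hdpre
    have hcnd : (if asc then pyListLt (fCh c) (fCh d) else pyListLt (fCh d) (fCh c))
        = relA asc c d := by
      cases asc <;> simp [pyListLt_fCh, relA]
    show insertLoop asc (fCh c) ((pre ++ d :: rest').map fCh) (fCh d :: rest'.map fCh) = _
    rw [insertLoop, hidx, hcnd]
    rcases Bool.eq_false_or_eq_true (relA asc c d) with hrel | hrel
    · rw [hrel]
      simp only [if_true, Option.getD_some]
      rw [insert_natCast _ _ _ (by simp)]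
      rw [hmap, List.take_left' (by simp), List.drop_left' (by simp)]
      rw [oins_pos _ hrel]
      simp
    · rw [hrel]
      rw [if_neg (by simp : ¬ (false = true))]
      simp only [Option.getD_some]
      by_cases hrest : rest' = []
      · subst hrest
        rw [if_pos (by simp)]
        rw [oins_neg _ hrel]
        simp [oins]
      · have hlen : ¬ ((pre.length == ((pre ++ d :: rest').map fCh).length - 1) = true) := by
          have : rest'.length ≠ 0 := fun h => hrest (List.length_eq_zero_iff.1 h)
          simp; omega
        rw [if_neg hlen]
        have hassoc : pre ++ d :: rest' = (pre ++ [d]) ++ rest' := by simp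
        rw [hassoc, ih (pre ++ [d]) (hassoc ▸ hnd) (hassoc ▸ hc) hrest]
        rw [oins_neg _ hrel]
        simp

theorem mem_oins (asc : Bool) (c : Char) : ∀ (ds : List Char) (x : Char),
    x ∈ oins asc c ds ↔ x = c ∨ x ∈ ds := by
  intro ds
  induction ds with
  | nil => intro x; simp [oins]
  | cons d ds ih =>
    intro x
    rcases Bool.eq_false_or_eq_true (relA asc c d) with hrel | hrel
    · rw [oins_pos _ hrel]
      simp only [List.mem_cons]
    · rw [oins_neg _ hrel]
      simp only [List.mem_cons, ih]
      tauto

theorem relA_trans (asc : Bool) {a b c : Char} (h1 : relA asc a b = true) (h2 : relA asc b c = true) :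
    relA asc a c = true := by
  cases asc <;> simp [relA] at h1 h2 ⊢
  · exact lt_trans h2 h1
  · exact lt_trans h1 h2

theorem pairwise_oins (asc : Bool) (c : Char) : ∀ (ds : List Char), c ∉ ds →
    ds.Pairwise (fun a b => relA asc a b = true) →
    (oins asc c ds).Pairwise (fun a b => relA asc a b = true) := by
  intro ds
  induction ds with
  | nil => intro _ _; simp [oins]
  | cons d ds ih =>
    intro hc hp
    have hcd : c ≠ d := fun h => hc (h ▸ List.mem_cons_self)
    rcases List.pairwise_cons.1 hp with ⟨hd, hp'⟩
    rcases Bool.eq_false_or_eq_true (relA asc c d) with hrel | hrel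
    · rw [oins_pos _ hrel]
      refine List.pairwise_cons.2 ⟨?_, hp⟩
      intro y hy
      rcases List.mem_cons.1 hy with rfl | hy
      · exact hrel
      · exact relA_trans asc hrel (hd y hy)
    · rw [oins_neg _ hrel]
      refine List.pairwise_cons.2 ⟨?_, ih (fun h => hc (List.mem_cons_of_mem _ h)) hp'⟩
      intro y hy
      rcases (mem_oins asc c ds y).1 hy with rfl | hy
      · exact relA_total asc hrel hcd
      · exact hd y hy

theorem nodup_oins (asc : Bool) (c : Char) : ∀ (ds : List Char), c ∉ ds → ds.Nodup →
    (oins asc c ds).Nodup := by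
  intro ds
  induction ds with
  | nil => intro _ _; simp [oins]
  | cons d ds ih =>
    intro hc hnd
    have hcd : c ≠ d := fun h => hc (h ▸ List.mem_cons_self)
    rcases List.nodup_cons.1 hnd with ⟨hd, hnd'⟩
    rcases Bool.eq_false_or_eq_true (relA asc c d) with hrel | hrel
    · rw [oins_pos _ hrel]
      refine List.nodup_cons.2 ⟨?_, hnd⟩
      intro h
      rcases List.mem_cons.1 h with he | he
      · exact hcd he
      · exact hc (List.mem_cons_of_mem _ he)
    · rw [oins_neg _ hrel]
      refine List.nodup_cons.2 ⟨?_, ih (fun h => hc (List.mem_cons_of_mem _ h)) hnd'⟩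
      intro h
      rcases (mem_oins asc c ds d).1 h with he | he
      · exact hcd he.symm
      · exact hd he

theorem stepF_map (asc : Bool) (ds : List Char) (x : Char) (hnd : ds.Nodup) :
    stepF asc (ds.map fCh) x = (if x ∈ ds then ds else oins asc x ds).map fCh := by
  rw [stepF]
  by_cases hx : x ∈ ds
  · have : PySem.List.count (ds.map fCh) (fCh x) ≠ 0 := by
      rw [PySem.List.count_eq]
      intro h
      exact (List.count_eq_zero.1 h) (List.mem_map_of_mem (a := x) hx)
    rw [if_neg (by simpa using this), if_pos hx]
  · have hcz : PySem.List.count (ds.map fCh) (fCh x) = 0 := by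
      rw [PySem.List.count_eq]
      apply List.count_eq_zero.2
      intro h
      obtain ⟨y, hy, he⟩ := List.mem_map.1 h
      exact hx (fCh_injective he ▸ hy)
    rw [if_pos (by simpa using hcz), if_neg hx]
    rcases List.eq_nil_or_concat' ds with rfl | _
    · rw [if_pos (by simp)]
      simp [oins, fCh]
    · have hne : ds ≠ [] := by rintro rfl; simp_all
      rw [if_neg (by simpa using fun h => hne (List.length_eq_zero_iff.1 h))]
      have := insertLoop_go asc x ds [] (by simpa using hnd) (by simpa using hx) hne
      simpa using this

theorem foldl_stepF (asc : Bool) : ∀ (xs ds : List Char), ds.Nodup →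
    ds.Pairwise (fun a b => relA asc a b = true) →
    ∃ es : List Char, xs.foldl (stepF asc) (ds.map fCh) = es.map fCh ∧ es.Nodup ∧
      es.Pairwise (fun a b => relA asc a b = true) ∧ (∀ x, x ∈ es ↔ x ∈ ds ∨ x ∈ xs) := by
  intro xs
  induction xs with
  | nil => intro ds hnd hp; exact ⟨ds, by simp, hnd, hp, by simp⟩
  | cons x xs ih =>
    intro ds hnd hp
    rw [List.foldl_cons, stepF_map asc ds x hnd]
    by_cases hx : x ∈ ds
    · rw [if_pos hx]
      obtain ⟨es, he, h1, h2, h3⟩ := ih ds hnd hp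
      refine ⟨es, he, h1, h2, ?_⟩
      intro y
      rw [h3]
      constructor
      · rintro (h | h)
        · exact Or.inl h
        · exact Or.inr (List.mem_cons_of_mem _ h)
      · rintro (h | h)
        · exact Or.inl h
        · rcases List.mem_cons.1 h with rfl | h
          · exact Or.inl hx
          · exact Or.inr h
    · rw [if_neg hx]
      obtain ⟨es, he, h1, h2, h3⟩ := ih (oins asc x ds) (nodup_oins asc x ds hx hnd)
        (pairwise_oins asc x ds hx hp)
      refine ⟨es, he, h1, h2, ?_⟩
      intro y
      rw [h3, mem_oins]
      constructor
      · rintro ((rfl | h) | h)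
        · exact Or.inr List.mem_cons_self
        · exact Or.inl h
        · exact Or.inr (List.mem_cons_of_mem _ h)
      · rintro (h | h)
        · exact Or.inl (Or.inr h)
        · rcases List.mem_cons.1 h with rfl | h
          · exact Or.inl (Or.inl rfl)
          · exact Or.inr h

theorem stOf_go : ∀ (es : List Char) (acc : List Char),
    (es.map fCh).foldl (fun st s => s.foldl (fun st r => match r with
      | LV.ch c => st ++ [c]
      | LV.num _ => st) st) acc = acc ++ es := by
  intro es
  induction es with
  | nil => intro acc; simp
  | cons e es ih => intro acc; simp [fCh, ih]

theorem stOf_map (es : List Char) : stOf (es.map fCh) = es := by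
  rw [stOf]; simpa using stOf_go es []

theorem group_sorted (asc : Bool) (xs zs : List Char) (hz : zs.Nodup)
    (hmem : ∀ x, x ∈ zs ↔ x ∈ xs) :
    stOf (xs.foldl (stepF asc) []) = PySem.List.sorted zs (fun c => c) (!asc) := by
  obtain ⟨es, he, h1, h2, h3⟩ := foldl_stepF asc xs [] (by simp) (by simp)
  have he' : xs.foldl (stepF asc) [] = es.map fCh := by simpa using he
  rw [he', stOf_map]
  have hperm : es.Perm zs := by
    rw [List.perm_ext_iff_of_nodup h1 hz]
    intro a
    rw [h3, hmem]
    simp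
  cases asc
  · exact (PySem.List.sorted_rev_eq_of_perm_of_pairwise_gt zs es (fun c => c) hperm
      (by refine h2.imp ?_; intro a b h; simpa [relA] using h)).symm
  · exact (PySem.List.sorted_eq_of_perm_of_pairwise_lt zs es (fun c => c) hperm
      (by refine h2.imp ?_; intro a b h; simpa [relA] using h)).symm

theorem count_pos_of_mem {t : List Char} {c : Char} (h : c ∈ t) : 0 < cntI t c := by
  rw [cntI]
  exact_mod_cast List.count_pos_iff.2 h

theorem outer_spec (t : List Char) : ∀ (ms : List Int) (fuel x : Nat) (out : List Char),
    ms.Pairwise (· > ·) →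
    (∀ m ∈ ms, ∃ c ∈ t, cntI t c = m) →
    ms.length ≤ fuel →
    outerLoop fuel x (pairs t (t.filter (fun c => decide (cntI t c ∈ ms)))) out
      = out ++ altGroups (PySem.Dict.counter t) x ms := by
  intro ms
  induction ms with
  | nil =>
    intro fuel x out _ _ _
    have hu : t.filter (fun c => decide (cntI t c ∈ ([] : List Int))) = [] := by simp
    rw [hu]
    have hpairs : pairs t [] = [] := rfl
    rw [hpairs]
    cases fuel with
    | zero => simp [outerLoop, altGroups]
    | succ k =>
      rw [outerLoop]
      have hmax : maxOfList [] = 0 := rfl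
      rw [hmax]
      simp [altGroups]
  | cons m ms' ih =>
    intro fuel x out hpw hatt hfuel
    cases fuel with
    | zero => simp at hfuel
    | succ k =>
      rcases List.pairwise_cons.1 hpw with ⟨hmgt, hpw'⟩
      obtain ⟨c0, hc0t, hc0⟩ := hatt m List.mem_cons_self
      have hmpos : 0 < m := hc0 ▸ count_pos_of_mem hc0t
      set u := t.filter (fun c => decide (cntI t c ∈ m :: ms')) with hu
      have hmax : maxOfList (pairs t u) = m := by
        apply maxOfList_eq
        · intro c hc
          have := List.of_mem_filter hc
          rcases List.mem_cons.1 (by simpa using this) with he | hin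
          · omega
          · exact le_of_lt (hmgt _ hin)
        · exact ⟨c0, List.mem_filter.2 ⟨hc0t, by simp [hc0]⟩, hc0⟩
        · omega
      have hm0 : (m == 0) = false := by simp; omega
      rw [outerLoop, hmax, hm0]
      simp only [Bool.false_eq_true, if_false]
      rw [count_pairs]
      rw [timesLoop_spec (x % 2 == 0) t m _ u [] rfl]
      -- the characters of this group, and the remaining letters
      have hzs : ∀ ch, ch ∈ (PySem.Set.ofList t).filter (fun ch => cntI t ch == m)
          ↔ ch ∈ u.filter (fun c => cntI t c == m) := by
        intro ch
        rw [List.mem_filter, List.mem_filter, PySem.Set.mem_ofList, hu, List.mem_filter]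
        constructor
        · rintro ⟨h1, h2⟩
          exact ⟨⟨h1, by simp at h2 ⊢; simp [h2]⟩, h2⟩
        · rintro ⟨⟨h1, _⟩, h2⟩
          exact ⟨h1, h2⟩
      have hznd : ((PySem.Set.ofList t).filter (fun ch => cntI t ch == m)).Nodup :=
        (PySem.Set.nodup_ofList t).filter _
      have hst : stOf ((u.filter (fun c => cntI t c == m)).foldl (stepF (x % 2 == 0)) [])
          = PySem.List.sorted ((PySem.Set.ofList t).filter (fun ch => cntI t ch == m))
              (fun c => c) (!(x % 2 == 0)) :=
        group_sorted (x % 2 == 0) _ _ hznd hzs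
      have hrem : u.filter (fun c => ¬ cntI t c == m) = t.filter (fun c => decide (cntI t c ∈ ms')) := by
        rw [hu, List.filter_filter]
        apply List.filter_congr
        intro c _
        by_cases h1 : cntI t c = m
        · have hnot : cntI t c ∉ ms' := by
            rw [h1]; intro hin; exact absurd (hmgt _ hin) (by omega)
          rw [h1] at hnot
          simp [h1, hnot]
        · by_cases h2 : cntI t c ∈ ms' <;> simp [h1, h2]
      have hkeys : ((PySem.Dict.counter t).keys.filter (fun ch => (PySem.Dict.counter t).getD ch 0 == m))
          = (PySem.Set.ofList t).filter (fun ch => cntI t ch == m) := by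
        rw [PySem.Dict.keys_counter]
        apply List.filter_congr
        intro ch _
        rw [PySem.Dict.getD_counter]
        rfl
      have hpar : ((x % 2 == 1) : Bool) = !(x % 2 == 0) := by
        rcases Nat.mod_two_eq_zero_or_one x with h | h <;> simp [h]
      have hatt' : ∀ m' ∈ ms', ∃ c ∈ t, cntI t c = m' := by
        intro m' hm'; exact hatt m' (List.mem_cons_of_mem _ hm')
      have hih := ih k (x + 1)
        (if m == 1 then out ++ (PySem.Int.toChars m) ++ stOf ((u.filter (fun c => cntI t c == m)).foldl (stepF (x % 2 == 0)) [])
         else out ++ (PySem.Int.toChars m) ++ stOf ((u.filter (fun c => cntI t c == m)).foldl (stepF (x % 2 == 0)) []) ++ [','])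
        hpw' hatt' (by simpa using Nat.le_of_succ_le_succ hfuel)
      rw [← hrem] at hih
      simp only [] at hih ⊢
      rw [hih]
      rw [show altGroups (PySem.Dict.counter t) x (m :: ms')
          = PySem.Int.toChars m
            ++ PySem.List.sorted (((PySem.Dict.counter t).keys).filter (fun ch => (PySem.Dict.counter t).getD ch 0 == m)) (fun c => c) (x % 2 == 1)
            ++ (if m == 1 then [] else [','])
            ++ altGroups (PySem.Dict.counter t) (x + 1) ms' from rfl]
      rw [hkeys, hpar, ← hst]
      by_cases h1 : (m == 1) = true <;> simp [h1, List.append_assoc]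

-- ===== VERDICT (by name: the statement is the Claim_ definition above) =====
theorem counter_values (t : List Char) :
    (PySem.Dict.counter t).values = (PySem.Set.ofList t).map (fun k => cntI t k) := by
  rw [PySem.Dict.values, PySem.Dict.items_counter, List.map_map]
  rfl

theorem rearrangedString_spec : Claim_equal_rearrangedString := by
  unfold Claim_equal_rearrangedString
  intro s _
  unfold Spec_rearrangedString
  rw [rearrangedString, rearrangedString_alt]
  set t := s.toList.filter (fun ch => PySem.Chars.isalnum ch) with ht
  have hsp : ' ' ∉ t := by
    intro h
    have h2 := List.of_mem_filter h
    have h3 : PySem.Chars.isalnum ' ' = false := by decide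
    rw [h3] at h2
    cases h2
  rw [replace_no_space t hsp, phase1_eq]
  have hnum : (pairs t t).length / 2 = t.length := by rw [length_pairs]; omega
  rw [hnum]
  have hcnt : t.foldl (fun (d : PySem.Dict Char Int) ch => d.modify ch 0 (· + 1)) PySem.Dict.empty
      = PySem.Dict.counter t := rfl
  rw [hcnt, counter_values]
  set M := PySem.List.sorted (PySem.Set.ofList ((PySem.Set.ofList t).map (fun k => cntI t k)))
    (fun v => v) true with hM
  have hperm : M.Perm (PySem.Set.ofList ((PySem.Set.ofList t).map (fun k => cntI t k))) :=
    PySem.List.sorted_perm _ _ _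
  have hnd : M.Nodup := hperm.symm.nodup (PySem.Set.nodup_ofList _)
  have hge : M.Pairwise (fun a b => b ≤ a) := PySem.List.sorted_pairwise_rev _ _
  have hpw : M.Pairwise (· > ·) := by
    have := hge.and hnd
    exact this.imp (fun h => lt_of_le_of_ne h.1 (Ne.symm h.2))
  have hmemM : ∀ v, v ∈ M ↔ v ∈ (PySem.Set.ofList t).map (fun k => cntI t k) := by
    intro v
    rw [hperm.mem_iff, PySem.Set.mem_ofList]
  have hatt : ∀ m ∈ M, ∃ c ∈ t, cntI t c = m := by
    intro m hm
    obtain ⟨c, hc, he⟩ := List.mem_map.1 ((hmemM m).1 hm)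
    exact ⟨c, (PySem.Set.mem_ofList t c).1 hc, he⟩
  have hlen : M.length ≤ t.length := by
    have h1 := hperm.length_eq
    have h2 := PySem.Set.length_ofList_le ((PySem.Set.ofList t).map (fun k => cntI t k))
    have h3 := PySem.Set.length_ofList_le t
    simp at h2
    omega
  have hfil : t.filter (fun c => decide (cntI t c ∈ M)) = t := by
    apply List.filter_eq_self.2
    intro c hc
    simp only [decide_eq_true_eq]
    exact (hmemM _).2 (List.mem_map.2 ⟨c, (PySem.Set.mem_ofList t c).2 hc, rfl⟩)
  have houter := outer_spec t M t.length 0 [] hpw hatt hlen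
  rw [hfil] at houter
  rw [houter]
  rfl
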